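-- pv_equiv track=rewrite | github.com/bniladri/RAG | chunking.py | heading_based_chunking
-- ===== SOURCE A (Python) =====
-- def heading_based_chunking(text):
--     sections = text.split("\n\n")
--     chunks = []
--     current_chunk = []
--     for section in sections:
--         if section.isupper():
--             if current_chunk:
--                 chunks.append(" ".join(current_chunk))
--                 current_chunk = []
--         current_chunk.append(section)
--     if current_chunk:
--         chunks.append(" ".join(current_chunk))
--     return chunks
-- ===== SOURCE B (Python) =====
-- def heading_based_chunking(text):
--     sections = text.split("\n\n")
--     n = len(sections)
--     starts = [0] + [i for i in range(1, n) if sections[i].isupper()]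
--     bounds = starts + [n]
--     return [" ".join(sections[a:b]) for a, b in zip(bounds, bounds[1:])]
-- ===== Notes on version B (the rewrite author's own statement) =====
-- stated objective: alternative
-- what changed: Replaces A's flush-style state machine (running current_chunk accumulator flushed at each uppercase heading) by first computing the list of chunk boundary indices (0 plus every later uppercase section) and then emitting one joined slice per consecutive pair of boundaries.
import Mathlib
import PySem

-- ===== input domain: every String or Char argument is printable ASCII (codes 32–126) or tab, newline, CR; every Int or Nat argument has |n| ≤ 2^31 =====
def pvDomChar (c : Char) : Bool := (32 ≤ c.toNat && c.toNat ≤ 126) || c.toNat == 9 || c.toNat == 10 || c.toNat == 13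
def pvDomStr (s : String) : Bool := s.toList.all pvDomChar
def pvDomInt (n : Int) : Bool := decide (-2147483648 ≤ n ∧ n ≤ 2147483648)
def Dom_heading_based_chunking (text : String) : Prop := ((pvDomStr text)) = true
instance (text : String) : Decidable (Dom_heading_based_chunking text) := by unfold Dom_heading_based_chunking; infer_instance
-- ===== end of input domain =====

-- B replaces A's flush-style accumulator loop by computing chunk boundary indices first
-- and joining one slice of sections per consecutive pair of boundaries (objective: alternative decomposition).


-- ===== PORT A =====
-- port of Python str.isupper (exact on the ASCII domain: cased chars are the letters):
-- at least one cased character and no lowercase character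
def pvStrIsupper (s : String) : Bool :=
  s.toList.any (fun c => PySem.Chars.isupper c || PySem.Chars.islower c) &&
  s.toList.all (fun c => !PySem.Chars.islower c)

-- the body of A's for-loop (flush current_chunk on an uppercase section, then append the section)
def pvStepA (acc : List String × List String) (sec : String) : List String × List String :=
  let fl := if pvStrIsupper sec then
              (if acc.2 ≠ [] then (acc.1 ++ [PySem.Str.join " " acc.2], ([] : List String)) else acc)
            else acc
  (fl.1, fl.2 ++ [sec])

def heading_based_chunking (text : String) : List String :=
  let sections := (PySem.Chars.splitOn text.toList ['\n', '\n']).map String.ofList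
  let st := sections.foldl pvStepA ([], [])
  if st.2 ≠ [] then st.1 ++ [PySem.Str.join " " st.2] else st.1

-- ===== PORT B =====
def heading_based_chunking_alt (text : String) : List String :=
  let sections := (PySem.Chars.splitOn text.toList ['\n', '\n']).map String.ofList
  let n : Int := (sections.length : Int)
  let starts : List Int :=
    0 :: (PySem.List.pyRange 1 n 1).filter (fun i => pvStrIsupper (PySem.List.pyGetD sections i ""))
  let bounds := starts ++ [n]
  (bounds.zip bounds.tail).map (fun ab =>
    PySem.Str.join " " (PySem.List.slice sections (some ab.1) (some ab.2)))

-- ===== PRECONDITION & SPEC =====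
def Spec_heading_based_chunking (text : String) (out : List String) : Prop := out = heading_based_chunking_alt text
instance (text : String) (out : List String) : Decidable (Spec_heading_based_chunking text out) := by unfold Spec_heading_based_chunking; infer_instance

-- ===== CLAIM (what is proved, stated in full; the proofs are below) =====
def Claim_equal_heading_based_chunking : Prop := ∀ (text : String), Dom_heading_based_chunking text → Spec_heading_based_chunking text (heading_based_chunking text)

-- ===== LEMMAS AND PROOFS =====

-- the grouping both programs compute: split the section list into runs, a new run
-- starting at every uppercase section (the first section always opens the first run)
def pvGroups (cur : List String) : List String → List (List String)
  | [] => [cur]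
  | s :: t => if pvStrIsupper s then cur :: pvGroups [s] t else pvGroups (cur ++ [s]) t

-- B's slices, boundary list consumed left to right
def pvMk (full : List String) (a : Nat) : List Nat → List (List String)
  | [] => [full.drop a]
  | b :: bs => (full.drop a).take (b - a) :: pvMk full b bs

-- B's boundary indices from position c on
def pvStarts (full : List String) (c : Nat) : List Nat :=
  (List.range' c (full.length - c)).filter (fun k => pvStrIsupper (full.getD k ""))

theorem pvSplitOnGo_ne_nil (sep : List Char) :
    ∀ (fuel : Nat) (l cur : List Char) (acc : List (List Char)),
      PySem.Chars.splitOn.go sep fuel l cur acc ≠ [] := by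
  intro fuel
  induction fuel with
  | zero => intro l cur acc; simp [PySem.Chars.splitOn.go]
  | succ n ih =>
    intro l cur acc
    cases l with
    | nil => simp [PySem.Chars.splitOn.go]
    | cons c rest =>
      rw [PySem.Chars.splitOn.go]
      split
      · exact ih _ _ _
      · exact ih _ _ _

theorem pvSplitOn_ne_nil (s sep : List Char) : PySem.Chars.splitOn s sep ≠ [] :=
  pvSplitOnGo_ne_nil sep _ _ _ _

-- A's fold with a non-empty open chunk produces the joined groups
theorem pvFoldA (tl : List String) : ∀ (chunks cur : List String), cur ≠ [] →
    (let st := tl.foldl pvStepA (chunks, cur);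
     if st.2 ≠ [] then st.1 ++ [PySem.Str.join " " st.2] else st.1)
      = chunks ++ (pvGroups cur tl).map (PySem.Str.join " ") := by
  induction tl with
  | nil => intro chunks cur h; simp [pvGroups, h]
  | cons s t ih =>
    intro chunks cur h
    simp only [List.foldl_cons, pvGroups]
    by_cases hs : pvStrIsupper s = true
    · have hstep : pvStepA (chunks, cur) s = (chunks ++ [PySem.Str.join " " cur], [s]) := by
        simp [pvStepA, hs, h]
      rw [hstep]
      have := ih (chunks ++ [PySem.Str.join " " cur]) [s] (by simp)
      simp only [this, hs]
      simp
    · have hstep : pvStepA (chunks, cur) s = (chunks, cur ++ [s]) := by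
        simp [pvStepA, hs]
      rw [hstep]
      have := ih chunks (cur ++ [s]) (by simp)
      simp only [this, hs]
      simp

theorem pvStarts_nil (full : List String) (c : Nat) (h : full.drop c = []) :
    pvStarts full c = [] := by
  have : full.length - c = 0 := by
    have := List.drop_eq_nil_iff.mp h
    omega
  simp [pvStarts, this]

theorem pvStarts_cons (full : List String) (c : Nat) (s : String) (tl : List String)
    (h : full.drop c = s :: tl) :
    pvStarts full c =
      if pvStrIsupper s then c :: pvStarts full (c + 1) else pvStarts full (c + 1) := by
  have hlen : full.length - c = tl.length + 1 := by
    have := congrArg List.length h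
    simp [List.length_drop] at this
    omega
  have hlen' : full.length - (c + 1) = tl.length := by omega
  have h0 : full[c]? = some s := by
    have : (full.drop c)[0]? = some s := by simp [h]
    simpa [List.getElem?_drop] using this
  rw [pvStarts, pvStarts, hlen, hlen', List.range'_succ, List.filter_cons]
  simp [h0]

-- the boundary slices from an open chunk `cur` equal the groups of the remaining tail
theorem pvMkStarts (tl : List String) : ∀ (cur : List String) (a : Nat) (full : List String),
    cur ≠ [] → full.drop a = cur ++ tl →
    pvMk full a (pvStarts full (a + cur.length)) = pvGroups cur tl := by
  induction tl with
  | nil =>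
    intro cur a full h hdrop
    have hnil : full.drop (a + cur.length) = [] := by
      rw [← List.drop_drop, hdrop]; simp
    rw [pvStarts_nil full _ hnil]
    simp [pvMk, pvGroups, hdrop]
  | cons s t ih =>
    intro cur a full h hdrop
    have hdrop2 : full.drop (a + cur.length) = s :: t := by
      rw [← List.drop_drop, hdrop]
      simpa using List.drop_left (l₁ := cur) (l₂ := s :: t)
    rw [pvStarts_cons full _ s t hdrop2]
    by_cases hs : pvStrIsupper s = true
    · rw [if_pos hs, pvMk]
      have htake : (full.drop a).take (a + cur.length - a) = cur := by
        have harith : a + cur.length - a = cur.length := by omega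
        rw [harith, hdrop]
        simpa using List.take_left (l₁ := cur) (l₂ := s :: t)
      have hg : pvGroups cur (s :: t) = cur :: pvGroups [s] t := by
        rw [pvGroups, if_pos hs]
      have hrec := ih [s] (a + cur.length) full (by simp) (by simpa using hdrop2)
      have harith2 : a + cur.length + [s].length = a + cur.length + 1 := by simp
      rw [harith2] at hrec
      rw [htake, hg, hrec]
    · rw [if_neg hs]
      have hg : pvGroups cur (s :: t) = pvGroups (cur ++ [s]) t := by
        rw [pvGroups, if_neg hs]
      have hrec := ih (cur ++ [s]) a full (by simp) (by simp [hdrop])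
      have hl : (cur ++ [s]).length = cur.length + 1 := by simp
      have harith : a + (cur ++ [s]).length = a + cur.length + 1 := by omega
      rw [harith] at hrec
      rw [hg, ← hrec]

-- B's zip-of-bounds form is pvMk
theorem pvZipMk (bs : List Nat) : ∀ (a : Nat) (full : List String),
    ((((a : Int) :: bs.map (Nat.cast) ++ [(full.length : Int)]).zip
        (bs.map (Nat.cast) ++ [(full.length : Int)])).map (fun ab =>
          PySem.List.slice full (some ab.1) (some ab.2)))
      = pvMk full a bs := by
  induction bs with
  | nil =>
    intro a full
    simp [pvMk, PySem.List.slice_natCast]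
  | cons b bs ih =>
    intro a full
    simp only [List.map_cons, List.cons_append, List.zip_cons_cons, List.map_cons, pvMk]
    congr 1
    · exact PySem.List.slice_natCast full a b
    · exact ih b full

-- the pyRange/pyGetD boundary filter is pvStarts, cast to Int
theorem pvRangeFilter (sections : List String) :
    (PySem.List.pyRange 1 (sections.length : Int) 1).filter
        (fun i => pvStrIsupper (PySem.List.pyGetD sections i ""))
      = (pvStarts sections 1).map Nat.cast := by
  have h1 : PySem.List.pyRange 1 (sections.length : Int) 1
      = (List.range' 1 (sections.length - 1)).map (Nat.cast : Nat → Int) := by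
    rw [PySem.List.pyRange_one, List.range'_eq_map_range, List.map_map]
    have : ((sections.length : Int) - 1).toNat = sections.length - 1 := by omega
    rw [this]
    apply List.map_congr_left
    intro k _
    simp [Function.comp]
  rw [h1, List.filter_map, pvStarts]
  congr 1
  apply List.filter_congr
  intro k _
  simp [Function.comp, PySem.List.pyGetD_natCast]

theorem pvMain (text : String) : heading_based_chunking text = heading_based_chunking_alt text := by
  unfold heading_based_chunking heading_based_chunking_alt
  obtain ⟨h0, t0, hcons⟩ :=
    List.exists_cons_of_ne_nil (pvSplitOn_ne_nil text.toList ['\n', '\n'])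
  rw [hcons]
  set s0 := String.ofList h0 with hs0
  set tl := t0.map String.ofList with htl
  have hmap : (h0 :: t0).map String.ofList = s0 :: tl := by simp [hs0, htl]
  rw [hmap]
  -- A side
  have hstep0 : pvStepA ([], []) s0 = ([], [s0]) := by
    simp [pvStepA]
  have hA := pvFoldA tl ([] : List String) [s0] (by simp)
  simp only [List.foldl_cons, hstep0]
  rw [hA]
  -- B side
  rw [pvRangeFilter (s0 :: tl)]
  have hzip := pvZipMk (pvStarts (s0 :: tl) 1) 0 (s0 :: tl)
  have hmk := pvMkStarts tl [s0] 0 (s0 :: tl) (by simp) (by simp)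
  have hone : (0 : Nat) + [s0].length = 1 := by simp
  rw [hone] at hmk
  have hcast0 : ((0 : Nat) : Int) = (0 : Int) := by norm_cast
  rw [hcast0] at hzip
  have hcomp : (fun ab : Int × Int =>
        PySem.Str.join " " (PySem.List.slice (s0 :: tl) (some ab.1) (some ab.2)))
      = (PySem.Str.join " ") ∘ (fun ab : Int × Int =>
        PySem.List.slice (s0 :: tl) (some ab.1) (some ab.2)) := rfl
  rw [hcomp, ← List.map_map]
  simp only [List.cons_append, List.tail_cons, List.nil_append]
  exact (congrArg (List.map (PySem.Str.join " ")) (hzip.trans hmk)).symm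

-- ===== VERDICT (by name: the statement is the Claim_ definition above) =====
theorem heading_based_chunking_spec : Claim_equal_heading_based_chunking := by
  intro text _
  unfold Spec_heading_based_chunking
  exact pvMain text
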